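-- pv_equiv track=rewrite | github.com/Shusmoy108/Data-Science | Asn1/Asn1_sc26s.py | makesonnets
-- ===== SOURCE A (Python) =====
-- import string
--
-- def remove_punc(s):
--     '''Returns string s with the punctuation removed'''
--     for char in string.punctuation:
--         s = s.replace(char, '')  #Replace punc char with null string
--     return s
--
-- def makesonnets(lines):
--     sonet=""
--     start=False
--     data={}
--     c=0;
--     for line in lines:
--         if(line.strip().isdigit()):
--             sonet="Sonnet "+line.strip()
--             start=True;
--             c=0;
--         elif start and line.strip()!="" :
--             c+=len(remove_punc(line.strip()).split(" "))
--             data[sonet]=c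
--     return data
-- ===== SOURCE B (Python) =====
-- import string
--
-- _PUNC = set(string.punctuation)
--
-- def _count(line):
--     s = line.strip()
--     return len(''.join(ch for ch in s if ch not in _PUNC).split(' '))
--
-- def makesonnets(lines):
--     data = {}
--     i = 0
--     n = len(lines)
--     while i < n:
--         s = lines[i].strip()
--         i += 1
--         if not s.isdigit():
--             continue
--         total = 0
--         seen = False
--         while i < n and not lines[i].strip().isdigit():
--             if lines[i].strip() != '':
--                 seen = True
--                 total += _count(lines[i])
--             i += 1
--         if seen:
--             data['Sonnet ' + s] = total
--     return data
-- ===== Notes on version B (the rewrite author's own statement) =====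
-- stated objective: alternative
-- what changed: A threads a sonnet-name/start-flag/running-counter state through one loop and rewrites data[sonet] on every body line; B scans headers in an outer loop and, per header, consumes its whole body block in an inner loop summing the word counts, inserting the key once, with punctuation removed by a single character filter instead of 32 successive str.replace passes.
import Mathlib
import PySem

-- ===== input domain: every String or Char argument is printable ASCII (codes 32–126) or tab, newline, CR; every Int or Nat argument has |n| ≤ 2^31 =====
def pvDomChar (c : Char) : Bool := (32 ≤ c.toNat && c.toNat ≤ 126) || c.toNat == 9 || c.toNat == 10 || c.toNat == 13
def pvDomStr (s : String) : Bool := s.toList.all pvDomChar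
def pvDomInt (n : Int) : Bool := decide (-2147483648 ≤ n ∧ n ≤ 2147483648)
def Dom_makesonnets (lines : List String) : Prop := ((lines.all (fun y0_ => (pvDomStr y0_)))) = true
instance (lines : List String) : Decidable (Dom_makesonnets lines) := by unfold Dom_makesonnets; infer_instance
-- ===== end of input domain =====

-- B replaces A's stateful flag-and-counter loop by a two-level scan (header, then its body block); objective: simpler decomposition, same cost.

-- ===== PORT A =====
-- string.punctuation
def punctuation : List Char := "!\"#$%&'()*+,-./:;<=>?@[\\]^_`{|}~".toList

def removePunc (s : String) : String :=
  punctuation.foldl (fun s c => PySem.Str.replace s (String.ofList [c]) "") s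

def aStep (st : String × Bool × PySem.Dict String Int × Int) (line : String) :
    String × Bool × PySem.Dict String Int × Int :=
  if PySem.Str.strIsdigit (PySem.Str.strip line) then
    ("Sonnet " ++ PySem.Str.strip line, true, st.2.2.1, 0)
  else if st.2.1 && (PySem.Str.strip line != "") then
    let c' := st.2.2.2 + ((PySem.Chars.splitOn (removePunc (PySem.Str.strip line)).toList [' ']).length : Int)
    (st.1, st.2.1, st.2.2.1.insert st.1 c', c')
  else st

def makesonnets (lines : List String) : List (String × Int) :=
  (lines.foldl aStep ("", false, PySem.Dict.empty, 0)).2.2.1.items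

-- ===== PORT B =====
-- Source B removes punctuation by filtering characters
def countB (line : String) : Int :=
  ((PySem.Chars.splitOn ((PySem.Str.strip line).toList.filter (fun ch => !punctuation.contains ch)) [' ']).length : Int)

-- the inner while loop of Source B: consume body lines until the next header, return (total, seen, rest)
def bBody : List String → Int → Bool → Int × Bool × List String
  | [], total, seen => (total, seen, [])
  | l :: rest, total, seen =>
    if PySem.Str.strIsdigit (PySem.Str.strip l) then (total, seen, l :: rest)
    else if PySem.Str.strip l != "" then bBody rest (total + countB l) true
    else bBody rest total seen

theorem bBody_len : ∀ (ls : List String) (t : Int) (sn : Bool),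
    (bBody ls t sn).2.2.length ≤ ls.length := by
  intro ls
  induction ls with
  | nil => intro t sn; simp [bBody]
  | cons l rest ih =>
    intro t sn
    simp only [bBody]
    split
    · simp
    · split
      · exact le_trans (ih _ _) (by simp)
      · exact le_trans (ih _ _) (by simp)

-- the outer while loop of Source B
def bMain (lines : List String) (data : PySem.Dict String Int) : PySem.Dict String Int :=
  match lines with
  | [] => data
  | l :: rest =>
    let s := PySem.Str.strip l
    if PySem.Str.strIsdigit s then
      let r := bBody rest 0 false
      bMain r.2.2 (if r.2.1 then data.insert ("Sonnet " ++ s) r.1 else data)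
    else bMain rest data
termination_by lines.length
decreasing_by
  · have := bBody_len rest 0 false
    simp only [List.length_cons]
    omega
  · simp

def makesonnets_alt (lines : List String) : List (String × Int) :=
  (bMain lines PySem.Dict.empty).items

-- ===== PRECONDITION & SPEC =====
def Spec_makesonnets (lines : List String) (out : List (String × Int)) : Prop := out = makesonnets_alt lines
instance (lines : List String) (out : List (String × Int)) : Decidable (Spec_makesonnets lines out) := by unfold Spec_makesonnets; infer_instance

-- ===== CLAIM (what is proved, stated in full; the proofs are below) =====
def Claim_equal_makesonnets : Prop := ∀ (lines : List String), Dom_makesonnets lines → Spec_makesonnets lines (makesonnets lines)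

-- ===== LEMMAS AND PROOFS =====

-- s.replace(p, '') for a single character p is a character filter
theorem replace_go_filter (p : Char) :
    ∀ (fuel : Nat) (cs acc : List Char), cs.length ≤ fuel →
    PySem.Chars.replace.go [p] [] fuel cs acc
      = acc.reverse ++ cs.filter (fun ch => !(ch == p)) := by
  intro fuel
  induction fuel with
  | zero =>
    intro cs acc h
    have : cs = [] := List.eq_nil_of_length_eq_zero (Nat.le_zero.mp h)
    subst this
    simp [PySem.Chars.replace.go]
  | succ n ih =>
    intro cs acc h
    cases cs with
    | nil => simp [PySem.Chars.replace.go]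
    | cons c t =>
      simp only [PySem.Chars.replace.go]
      by_cases hc : c = p
      · subst hc
        have hp : [c].isPrefixOf (c :: t) = true := by simp [List.isPrefixOf]
        rw [if_pos hp]
        simp only [List.length_cons, List.length_nil, List.drop_succ_cons, List.drop_zero,
          List.reverse_nil, List.nil_append]
        rw [ih t acc (by simpa using Nat.le_of_succ_le_succ h)]
        simp
      · have hp : [p].isPrefixOf (c :: t) = false := by
          simp [List.isPrefixOf]
          exact fun hh => hc hh.symm
        rw [if_neg (by simp [hp])]
        rw [ih t (c :: acc) (by simpa using Nat.le_of_succ_le_succ h)]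
        simp [hc]

theorem replace_single (p : Char) (cs : List Char) :
    PySem.Chars.replace cs [p] [] = cs.filter (fun ch => !(ch == p)) := by
  rw [PySem.Chars.replace]
  simp only [List.isEmpty_cons]
  rw [replace_go_filter p cs.length cs [] (le_refl _)]
  simp

theorem fold_replace : ∀ (ps : List Char) (s : String),
    ps.foldl (fun s c => PySem.Str.replace s (String.ofList [c]) "") s
      = String.ofList (s.toList.filter (fun ch => !ps.contains ch)) := by
  intro ps
  induction ps with
  | nil => intro s; simp
  | cons p ps ih =>
    intro s
    simp only [List.foldl_cons]
    rw [ih]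
    congr 1
    have h1 : (PySem.Str.replace s (String.ofList [p]) "").toList
        = s.toList.filter (fun ch => !(ch == p)) := by
      rw [PySem.Str.toList_replace]
      have he : "".toList = ([] : List Char) := rfl
      rw [String.toList_ofList, he, replace_single]
    rw [h1, List.filter_filter]
    apply List.filter_congr
    intro ch _
    by_cases h : ch = p <;> simp [h, Bool.and_comm]




theorem count_eq (line : String) :
    ((PySem.Chars.splitOn (removePunc (PySem.Str.strip line)).toList [' ']).length : Int)
      = countB line := by
  unfold removePunc countB
  rw [fold_replace, String.toList_ofList]

theorem lem2 : ∀ (rest : List String) (son : String) (c : Int) (seen : Bool)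
    (D : PySem.Dict String Int),
    (rest.foldl aStep (son, true, (if seen then D.insert son c else D), c)).2.2.1
      = bMain (bBody rest c seen).2.2
          (if (bBody rest c seen).2.1 then D.insert son (bBody rest c seen).1 else D) := by
  intro rest
  induction rest with
  | nil => intro son c seen D; cases seen <;> simp [bBody, bMain]
  | cons l rest ih =>
    intro son c seen D
    by_cases hd : PySem.Str.strIsdigit (PySem.Str.strip l) = true
    · have hstep : aStep (son, true, (if seen then D.insert son c else D), c) l
          = ("Sonnet " ++ PySem.Str.strip l, true, (if seen then D.insert son c else D), 0) := by
        simp only [aStep]; rw [if_pos hd]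
      have hb : bBody (l :: rest) c seen = (c, seen, l :: rest) := by
        simp only [bBody]; rw [if_pos hd]
      rw [List.foldl_cons, hstep, hb]
      have h1 := ih ("Sonnet " ++ PySem.Str.strip l) 0 false (if seen then D.insert son c else D)
      simp only [if_neg Bool.false_ne_true] at h1
      rw [h1]
      conv_rhs => rw [bMain]
      simp only []
      rw [if_pos hd]
    · by_cases he : PySem.Str.strip l = ""
      · have hstep : aStep (son, true, (if seen then D.insert son c else D), c) l
            = (son, true, (if seen then D.insert son c else D), c) := by
          simp only [aStep]; rw [if_neg hd, if_neg (by simp [he])]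
        have hb : bBody (l :: rest) c seen = bBody rest c seen := by
          simp only [bBody]; rw [if_neg hd, if_neg (by simp [he])]
        rw [List.foldl_cons, hstep, hb, ih]
      · have hc' : (if seen then D.insert son c else D).insert son
            (c + ((PySem.Chars.splitOn (removePunc (PySem.Str.strip l)).toList [' ']).length : Int))
            = D.insert son (c + countB l) := by
          rw [count_eq]
          cases seen
          · simp
          · simp [PySem.Dict.insert_insert_self]
        have hstep : aStep (son, true, (if seen then D.insert son c else D), c) l
            = (son, true, D.insert son (c + countB l), c + countB l) := by
          simp only [aStep]
          rw [if_neg hd, if_pos (by simp [bne_iff_ne, he])]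
          rw [hc', count_eq]
        have hb : bBody (l :: rest) c seen = bBody rest (c + countB l) true := by
          simp only [bBody]; rw [if_neg hd, if_pos (by simp [bne_iff_ne, he])]
        rw [List.foldl_cons, hstep, hb]
        have h2 := ih son (c + countB l) true D
        simp only [if_pos] at h2
        exact h2

theorem lem1 : ∀ (lines : List String) (son : String) (c : Int) (D : PySem.Dict String Int),
    (lines.foldl aStep (son, false, D, c)).2.2.1 = bMain lines D := by
  intro lines
  induction lines with
  | nil => intro son c D; simp [bMain]
  | cons l rest ih =>
    intro son c D
    by_cases hd : PySem.Str.strIsdigit (PySem.Str.strip l) = true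
    · have hstep : aStep (son, false, D, c) l
          = ("Sonnet " ++ PySem.Str.strip l, true, D, 0) := by
        simp only [aStep]; rw [if_pos hd]
      rw [List.foldl_cons, hstep]
      have h1 := lem2 rest ("Sonnet " ++ PySem.Str.strip l) 0 false D
      simp only [if_neg Bool.false_ne_true] at h1
      rw [h1]
      conv_rhs => rw [bMain]
      simp only []
      rw [if_pos hd]
    · have hstep : aStep (son, false, D, c) l = (son, false, D, c) := by
        simp only [aStep]; rw [if_neg hd]
        simp
      rw [List.foldl_cons, hstep, ih]
      conv_rhs => rw [bMain]
      simp only []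
      rw [if_neg hd]

-- ===== VERDICT (by name: the statement is the Claim_ definition above) =====
theorem makesonnets_spec : Claim_equal_makesonnets := by
  intro lines _
  unfold Spec_makesonnets makesonnets makesonnets_alt
  rw [lem1]
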